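-- pv_equiv track=rewrite | github.com/PrinceDuru/scholarlens | facade/pipeline_facade.py | _parse_datasets_methods
-- ===== SOURCE A (Python) =====
-- from typing import List, Tuple
--
-- def _parse_datasets_methods(raw: str) -> Tuple[List[str], List[str]]:
--     """Parse 'Datasets: ...' and 'Methods: ...' lines from the LLM response."""
--     datasets: List[str] = []
--     methods: List[str] = []
--     for line in raw.splitlines():
--         lower = line.lower()
--         if lower.startswith("datasets:"):
--             value = line.split(":", 1)[1].strip()
--             datasets = [d.strip() for d in value.split(",") if d.strip()]
--         elif lower.startswith("methods:"):
--             value = line.split(":", 1)[1].strip()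
--             methods = [m.strip() for m in value.split(",") if m.strip()]
--     return datasets, methods
-- ===== SOURCE B (Python) =====
-- from typing import List, Tuple
--
-- def _parse_datasets_methods(raw: str) -> Tuple[List[str], List[str]]:
--     """Parse 'Datasets: ...' and 'Methods: ...' lines from the LLM response."""
--     lines = raw.splitlines()
--
--     def _last_match(prefix: str) -> List[str]:
--         # last matching line wins == first match when scanning in reverse
--         for line in reversed(lines):
--             if line.lower().startswith(prefix):
--                 value = line.split(":", 1)[1].strip()
--                 return [x.strip() for x in value.split(",") if x.strip()]
--         return []
--
--     return _last_match("datasets:"), _last_match("methods:")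
-- ===== Notes on version B (the rewrite author's own statement) =====
-- stated objective: alternative
-- what changed: Replaces the single interleaved fold carrying a (datasets, methods) pair with a reusable reverse scan that returns the first (i.e. last-in-order) matching line's parsed list, called once per prefix.
import Mathlib
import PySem

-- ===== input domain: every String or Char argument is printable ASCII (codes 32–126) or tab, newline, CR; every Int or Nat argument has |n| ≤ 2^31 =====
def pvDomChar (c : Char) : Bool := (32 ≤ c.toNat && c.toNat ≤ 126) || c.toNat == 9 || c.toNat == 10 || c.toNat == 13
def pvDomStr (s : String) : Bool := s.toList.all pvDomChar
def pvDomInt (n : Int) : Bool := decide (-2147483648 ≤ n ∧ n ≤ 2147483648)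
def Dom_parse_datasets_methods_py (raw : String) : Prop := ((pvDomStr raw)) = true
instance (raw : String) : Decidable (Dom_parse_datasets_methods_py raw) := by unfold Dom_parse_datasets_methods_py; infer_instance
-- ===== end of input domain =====

-- B replaces A's single fold over the lines (carrying both lists) by one reverse scan per
-- prefix returning the first hit (= last match in order); alternative decomposition, same cost.

-- ===== PORT A =====
-- line.split(":",1)[1]: the startswith guard guarantees a ':' is present, so the list has
-- two elements and the [1] index never raises; getD is exact on the guarded branch.
def pvStepA (acc : List String × List String) (line : String) : List String × List String :=
  let lower := PySem.Str.lower line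
  if PySem.Str.startswith lower "datasets:" then
    let value := PySem.Str.strip (((PySem.Str.splitMax? line ":" 1).getD []).getD 1 "")
    ((((PySem.Str.split? value ",").getD []).filter (fun d => PySem.Str.strip d != "")).map PySem.Str.strip, acc.2)
  else if PySem.Str.startswith lower "methods:" then
    let value := PySem.Str.strip (((PySem.Str.splitMax? line ":" 1).getD []).getD 1 "")
    (acc.1, (((PySem.Str.split? value ",").getD []).filter (fun m => PySem.Str.strip m != "")).map PySem.Str.strip)
  else acc

def parse_datasets_methods_py (raw : String) : List String × List String :=
  (PySem.Str.splitlines raw).foldl pvStepA ([], [])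

-- ===== PORT B =====
def pvParseList (line : String) : List String :=
  let value := PySem.Str.strip (((PySem.Str.splitMax? line ":" 1).getD []).getD 1 "")
  (((PySem.Str.split? value ",").getD []).filter (fun x => PySem.Str.strip x != "")).map PySem.Str.strip

-- first match while scanning the (reversed) lines; [] if none matches
def pvLastMatch (pfx : String) : List String → List String
  | [] => []
  | l :: ls =>
    if PySem.Str.startswith (PySem.Str.lower l) pfx then pvParseList l else pvLastMatch pfx ls

def parse_datasets_methods_py_alt (raw : String) : List String × List String :=
  let rev := (PySem.Str.splitlines raw).reverse
  (pvLastMatch "datasets:" rev, pvLastMatch "methods:" rev)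

-- ===== PRECONDITION & SPEC =====
def Spec_parse_datasets_methods_py (raw : String) (out : List String × List String) : Prop := out = parse_datasets_methods_py_alt raw
instance (raw : String) (out : List String × List String) : Decidable (Spec_parse_datasets_methods_py raw out) := by unfold Spec_parse_datasets_methods_py; infer_instance

-- ===== CLAIM (what is proved, stated in full; the proofs are below) =====
def Claim_equal_parse_datasets_methods_py : Prop := ∀ (raw : String), Dom_parse_datasets_methods_py raw → Spec_parse_datasets_methods_py raw (parse_datasets_methods_py raw)

-- ===== LEMMAS AND PROOFS =====

-- Option-valued first-match scan, for the loop invariant (default threads through)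
def pvScanOpt (pfx : String) : List String → Option (List String)
  | [] => none
  | l :: ls =>
    if PySem.Str.startswith (PySem.Str.lower l) pfx then some (pvParseList l) else pvScanOpt pfx ls

theorem pvLastMatch_eq (pfx : String) (xs : List String) :
    pvLastMatch pfx xs = (pvScanOpt pfx xs).getD [] := by
  induction xs with
  | nil => rfl
  | cons l ls ih => simp [pvLastMatch, pvScanOpt]; split_ifs <;> simp [ih]

theorem pvScanOpt_append (pfx : String) (xs ys : List String) :
    pvScanOpt pfx (xs ++ ys) = (pvScanOpt pfx xs).orElse (fun _ => pvScanOpt pfx ys) := by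
  induction xs with
  | nil => rfl
  | cons l ls ih => simp [pvScanOpt]; split_ifs <;> simp [ih]

theorem pvFold_eq (lines : List String) : ∀ d m : List String,
    lines.foldl pvStepA (d, m) =
      ((pvScanOpt "datasets:" lines.reverse).getD d, (pvScanOpt "methods:" lines.reverse).getD m) := by
  induction lines with
  | nil => intro d m; rfl
  | cons l ls ih =>
    intro d m
    have h1 : pvStepA (d, m) l =
        ((pvScanOpt "datasets:" [l]).getD d, (pvScanOpt "methods:" [l]).getD m) := by
      simp only [pvScanOpt, pvStepA, pvParseList]
      split_ifs with hd hm
      · -- a line cannot start with both "datasets:" and "methods:"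
        exfalso
        rw [PySem.Str.startswith_eq] at hd hm
        obtain ⟨t1, e1⟩ := (PySem.Chars.startswith_iff _ _).1 hd
        obtain ⟨t2, e2⟩ := (PySem.Chars.startswith_iff _ _).1 hm
        rw [← e1] at e2
        simp at e2
      · simp
      · simp
      · simp
    calc (l :: ls).foldl pvStepA (d, m)
        = ls.foldl pvStepA (pvStepA (d, m) l) := rfl
      _ = _ := by
          rw [h1, ih]
          simp only [List.reverse_cons, pvScanOpt_append]
          cases pvScanOpt "datasets:" ls.reverse <;> cases pvScanOpt "methods:" ls.reverse <;> simp [Option.orElse]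

-- ===== VERDICT (by name: the statement is the Claim_ definition above) =====
theorem parse_datasets_methods_py_spec : Claim_equal_parse_datasets_methods_py := by
  intro raw _
  unfold Spec_parse_datasets_methods_py parse_datasets_methods_py parse_datasets_methods_py_alt
  rw [pvFold_eq]; simp only [pvLastMatch_eq]
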